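-- pv_equiv track=rewrite | github.com/alesjdev/COVID_World_Data | Final.py | calculate_min_max_avg_diff
-- ===== SOURCE A (Python) =====
-- def calculate_min_max_avg_diff(data, user_country, user_range, position_in_list):
--     # Initialize amount of dates checked and the total numbers
--     total_dates = 0
--     total_amount = 0
--     # Initialize minimum and max values found to first date in list
--     minimum_value = data[user_country][user_range[0]][position_in_list]
--     maximum_value = data[user_country][user_range[0]][position_in_list]
--     # Difference in number between end and start date
--     diff = data[user_country][user_range[-1]][position_in_list] - data[user_country][user_range[0]][position_in_list]
--
--     for specific_date in user_range:
--         current_number = data[user_country][specific_date][position_in_list]  # current checked number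
--         total_amount += current_number
--         total_dates += 1
--         if current_number < minimum_value:
--             minimum_value = current_number
--         elif current_number > maximum_value:
--             maximum_value = current_number
--
--     return [minimum_value, maximum_value, total_amount // total_dates, diff]
-- ===== SOURCE B (Python) =====
-- def _mms(vals):
--     # divide and conquer: min, max and sum of a nonempty list, merging halves
--     if len(vals) == 1:
--         v = vals[0]
--         return (v, v, v)
--     m = len(vals) // 2
--     mn1, mx1, s1 = _mms(vals[:m])
--     mn2, mx2, s2 = _mms(vals[m:])
--     return (mn1 if mn1 < mn2 else mn2, mx1 if mx1 > mx2 else mx2, s1 + s2)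
--
--
-- def calculate_min_max_avg_diff(data, user_country, user_range, position_in_list):
--     country = data[user_country]
--     diff = country[user_range[-1]][position_in_list] - country[user_range[0]][position_in_list]
--     values = [country[d][position_in_list] for d in user_range]
--     mn, mx, total = _mms(values)
--     return [mn, mx, total // len(values), diff]
-- ===== Notes on version B (the rewrite author's own statement) =====
-- stated objective: alternative
-- what changed: Replaces A's single fused linear accumulation loop (running count/sum/min/max with an if/elif update) by a recursive divide-and-conquer that splits the extracted value list into halves and merges (min, max, sum) triples, plus the endpoint diff computed up front.
import Mathlib
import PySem

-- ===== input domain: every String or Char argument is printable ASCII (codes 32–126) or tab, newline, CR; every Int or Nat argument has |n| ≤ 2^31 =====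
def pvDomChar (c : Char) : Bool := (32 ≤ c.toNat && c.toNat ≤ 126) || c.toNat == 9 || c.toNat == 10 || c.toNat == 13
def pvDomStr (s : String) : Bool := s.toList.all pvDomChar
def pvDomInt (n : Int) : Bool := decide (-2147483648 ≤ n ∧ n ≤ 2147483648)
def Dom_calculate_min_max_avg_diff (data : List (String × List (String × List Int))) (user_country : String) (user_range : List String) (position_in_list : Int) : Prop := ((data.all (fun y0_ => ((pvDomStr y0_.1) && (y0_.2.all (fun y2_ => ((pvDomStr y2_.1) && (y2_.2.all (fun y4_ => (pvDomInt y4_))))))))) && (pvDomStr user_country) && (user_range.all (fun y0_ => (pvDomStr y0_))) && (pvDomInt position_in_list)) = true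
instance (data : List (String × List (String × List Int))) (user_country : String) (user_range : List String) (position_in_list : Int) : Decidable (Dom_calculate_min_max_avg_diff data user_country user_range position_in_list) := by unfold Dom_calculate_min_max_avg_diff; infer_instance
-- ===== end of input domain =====

-- B replaces A's fused linear accumulation loop by a recursive divide-and-conquer that
-- splits the value list into halves and merges (min, max, sum) triples; same cost,
-- a genuinely different traversal (alternative decomposition, not claimed faster).

-- ===== PORT A =====
-- the triple dict/dict/list access data[user_country][d][position_in_list]; defaults are
-- unreachable under Pre_ (every lookup succeeds there)
def pvGetVal (data : List (String × List (String × List Int))) (user_country : String) (position_in_list : Int) (d : String) : Int :=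
  PySem.List.pyGetD ((PySem.Dict.mk ((PySem.Dict.mk data).getD user_country [])).getD d []) position_in_list 0

def calculate_min_max_avg_diff (data : List (String × List (String × List Int))) (user_country : String) (user_range : List String) (position_in_list : Int) : List Int :=
  let get := pvGetVal data user_country position_in_list
  let minimum_value := get (PySem.List.pyGetD user_range 0 "")
  let maximum_value := minimum_value
  let diff := get (PySem.List.pyGetD user_range (-1) "") - get (PySem.List.pyGetD user_range 0 "")
  let st := user_range.foldl
    (fun (s : Int × Int × Int × Int) specific_date =>
      let current_number := get specific_date
      (s.1 + 1, s.2.1 + current_number,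
       if current_number < s.2.2.1 then current_number else s.2.2.1,
       if current_number < s.2.2.1 then s.2.2.2
       else if s.2.2.2 < current_number then current_number else s.2.2.2))
    (0, 0, minimum_value, maximum_value)
  [st.2.2.1, st.2.2.2, PySem.Int.floordiv st.2.1 st.1, diff]

-- ===== PORT B =====
-- _mms: divide-and-conquer (min, max, sum) of a nonempty list; the [] branch is a
-- totality guard only (Python's _mms never receives [] from B's caller)
def pvMms (vals : List Int) : Int × Int × Int :=
  if vals.length = 1 then
    let v := PySem.List.pyGetD vals 0 0
    (v, v, v)
  else if vals.length = 0 then (0, 0, 0)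
  else
    let m := vals.length / 2
    let a := pvMms (vals.take m)
    let b := pvMms (vals.drop m)
    (if a.1 < b.1 then a.1 else b.1,
     if b.2.1 < a.2.1 then a.2.1 else b.2.1,
     a.2.2 + b.2.2)
termination_by vals.length
decreasing_by
  · simp only [List.length_take]; omega
  · simp only [List.length_drop]; omega

def calculate_min_max_avg_diff_alt (data : List (String × List (String × List Int))) (user_country : String) (user_range : List String) (position_in_list : Int) : List Int :=
  let country := (PySem.Dict.mk data).getD user_country []
  let get := fun (d : String) => PySem.List.pyGetD ((PySem.Dict.mk country).getD d []) position_in_list 0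
  let diff := get (PySem.List.pyGetD user_range (-1) "") - get (PySem.List.pyGetD user_range 0 "")
  let values := user_range.map get
  let r := pvMms values
  [r.1, r.2.1, PySem.Int.floordiv r.2.2 values.length, diff]

-- ===== PRECONDITION & SPEC =====
-- Pre_: exactly the inputs where the Python A returns: nonempty date range (else IndexError),
-- the country present (else KeyError), every date of the range present in the country's dict
-- (else KeyError) and position_in_list a valid (possibly negative) index into each date's list
-- (else IndexError). B raises on the same inputs.
def Pre_calculate_min_max_avg_diff (data : List (String × List (String × List Int))) (user_country : String) (user_range : List String) (position_in_list : Int) : Prop :=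
  user_range ≠ [] ∧
  (PySem.Dict.mk data).contains user_country = true ∧
  ∀ d ∈ user_range,
    (PySem.Dict.mk ((PySem.Dict.mk data).getD user_country [])).contains d = true ∧
    PySem.Raise.InRange ((PySem.Dict.mk ((PySem.Dict.mk data).getD user_country [])).getD d []).length position_in_list
instance (data : List (String × List (String × List Int))) (user_country : String) (user_range : List String) (position_in_list : Int) : Decidable (Pre_calculate_min_max_avg_diff data user_country user_range position_in_list) := by unfold Pre_calculate_min_max_avg_diff; infer_instance

def pvWitness_calculate_min_max_avg_diff : (List (String × List (String × List Int))) × String × List String × Int :=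
  ([("US", [("d1", [1, 2]), ("d2", [3, 4])])], "US", ["d1", "d2"], 0)

def Spec_calculate_min_max_avg_diff (data : List (String × List (String × List Int))) (user_country : String) (user_range : List String) (position_in_list : Int) (out : List Int) : Prop := out = calculate_min_max_avg_diff_alt data user_country user_range position_in_list
instance (data : List (String × List (String × List Int))) (user_country : String) (user_range : List String) (position_in_list : Int) (out : List Int) : Decidable (Spec_calculate_min_max_avg_diff data user_country user_range position_in_list out) := by unfold Spec_calculate_min_max_avg_diff; infer_instance

-- ===== CLAIM (what is proved, stated in full; the proofs are below) =====
def Claim_equal_calculate_min_max_avg_diff : Prop := ∀ (data : List (String × List (String × List Int))) (user_country : String) (user_range : List String) (position_in_list : Int), Dom_calculate_min_max_avg_diff data user_country user_range position_in_list → Pre_calculate_min_max_avg_diff data user_country user_range position_in_list → Spec_calculate_min_max_avg_diff data user_country user_range position_in_list (calculate_min_max_avg_diff data user_country user_range position_in_list)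

-- ===== LEMMAS AND PROOFS =====

theorem pvWitness_ok :
    Dom_calculate_min_max_avg_diff pvWitness_calculate_min_max_avg_diff.1 pvWitness_calculate_min_max_avg_diff.2.1 pvWitness_calculate_min_max_avg_diff.2.2.1 pvWitness_calculate_min_max_avg_diff.2.2.2 ∧
    Pre_calculate_min_max_avg_diff pvWitness_calculate_min_max_avg_diff.1 pvWitness_calculate_min_max_avg_diff.2.1 pvWitness_calculate_min_max_avg_diff.2.2.1 pvWitness_calculate_min_max_avg_diff.2.2.2 := by
  decide

-- A's fused loop, characterised: starting from (td, ta, mn, mx) with mn ≤ mx it computes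
-- the count, the running sum and the running min/max of the accessed values.
theorem foldA_char (get : String → Int) (l : List String) (td ta mn mx : Int) (h : mn ≤ mx) :
    l.foldl
      (fun (s : Int × Int × Int × Int) specific_date =>
        let current_number := get specific_date
        (s.1 + 1, s.2.1 + current_number,
         if current_number < s.2.2.1 then current_number else s.2.2.1,
         if current_number < s.2.2.1 then s.2.2.2
         else if s.2.2.2 < current_number then current_number else s.2.2.2))
      (td, ta, mn, mx)
    = (td + l.length, (l.map get).foldl (· + ·) ta, (l.map get).foldl min mn, (l.map get).foldl max mx) := by
  induction l generalizing td ta mn mx with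
  | nil => simp
  | cons x t ih =>
    simp only [List.foldl_cons, List.map_cons]
    have hmn : (if get x < mn then get x else mn) = min mn (get x) := by
      rcases le_total mn (get x) with h1 | h1 <;> simp [min_def] <;> omega
    have hmx : (if get x < mn then mx else if mx < get x then get x else mx) = max mx (get x) := by
      rcases le_total mx (get x) with h1 | h1 <;> simp [max_def] <;> omega
    rw [hmn, hmx,
      ih (td + 1) (ta + get x) _ _ (le_trans (min_le_left _ _) (le_trans h (le_max_left _ _)))]
    simp only [List.length_cons, Prod.mk.injEq]
    push_cast; ring_nf; simp

theorem foldl_min_pull (l : List Int) (a b : Int) :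
    l.foldl min (min a b) = min a (l.foldl min b) := by
  induction l generalizing b with
  | nil => rfl
  | cons c t ih => simp only [List.foldl_cons, min_assoc, ih]

theorem foldl_max_pull (l : List Int) (a b : Int) :
    l.foldl max (max a b) = max a (l.foldl max b) := by
  induction l generalizing b with
  | nil => rfl
  | cons c t ih => simp only [List.foldl_cons, max_assoc, ih]

theorem foldl_add_pull (l : List Int) (a b : Int) :
    l.foldl (· + ·) (a + b) = a + l.foldl (· + ·) b := by
  induction l generalizing b with
  | nil => rfl
  | cons c t ih => simp only [List.foldl_cons, add_assoc, ih]

-- the divide-and-conquer helper computes exactly the running min, max and sum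
theorem pvMms_char : ∀ (n : Nat) (v : Int) (vs : List Int), (v :: vs).length ≤ n →
    pvMms (v :: vs) = (vs.foldl min v, vs.foldl max v, vs.foldl (· + ·) v) := by
  intro n
  induction n with
  | zero => intro v vs h; simp at h
  | succ n ih =>
    intro v vs h
    rw [pvMms]
    by_cases h1 : (v :: vs).length = 1
    · have : vs = [] := by cases vs <;> simp_all
      subst this; simp [PySem.List.pyGetD, PySem.List.pyGet?, PySem.List.pyIdx?]
    · rw [if_neg h1, if_neg (by simp)]
      have hlen : 2 ≤ (v :: vs).length := by
        simp only [List.length_cons] at *; omega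
      set m := (v :: vs).length / 2 with hm
      have hm1 : 1 ≤ m := by rw [hm]; simp only [List.length_cons] at *; omega
      have hmlt : m < (v :: vs).length := by rw [hm]; simp only [List.length_cons] at *; omega
      obtain ⟨k, hk⟩ : ∃ k, m = k + 1 := ⟨m - 1, by omega⟩
      have hkvs : k < vs.length := by
        simp only [List.length_cons] at hmlt; omega
      have htake : (v :: vs).take m = v :: vs.take k := by rw [hk]; rfl
      have hdrop : (v :: vs).drop m = vs.drop k := by rw [hk]; rfl
      obtain ⟨w, ws, hws⟩ : ∃ w ws, vs.drop k = w :: ws := by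
        cases hvd : vs.drop k with
        | nil => exact absurd (by simpa using congrArg List.length hvd) (by omega)
        | cons a b => exact ⟨a, b, rfl⟩
      have hm2 : 2 * m ≤ (v :: vs).length + 1 := by rw [hm]; omega
      have hlt1 : (v :: vs.take k).length ≤ n := by
        simp only [List.length_cons, List.length_take] at *
        omega
      have hlt2 : (w :: ws).length ≤ n := by
        have hdl : (vs.drop k).length = vs.length - k := by simp
        rw [hws] at hdl
        simp only [List.length_cons] at *
        omega
      simp only [htake, hdrop, hws]
      rw [ih v (vs.take k) hlt1, ih w ws hlt2]
      have hsplit : vs = vs.take k ++ (w :: ws) := by rw [← hws]; simp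
      have e1 : vs.foldl min v = min ((vs.take k).foldl min v) (ws.foldl min w) := by
        conv_lhs => rw [hsplit]
        rw [List.foldl_append, List.foldl_cons, foldl_min_pull]
      have e2 : vs.foldl max v = max ((vs.take k).foldl max v) (ws.foldl max w) := by
        conv_lhs => rw [hsplit]
        rw [List.foldl_append, List.foldl_cons, foldl_max_pull]
      have e3 : vs.foldl (· + ·) v = ((vs.take k).foldl (· + ·) v) + (ws.foldl (· + ·) w) := by
        conv_lhs => rw [hsplit]
        rw [List.foldl_append, List.foldl_cons, foldl_add_pull]
      rw [e1, e2, e3]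
      simp only [Prod.mk.injEq]
      refine ⟨?_, ?_, by trivial⟩
      · rcases lt_or_ge ((vs.take k).foldl min v) (ws.foldl min w) with h2 | h2 <;>
          simp [min_def] <;> omega
      · rcases lt_or_ge (ws.foldl max w) ((vs.take k).foldl max v) with h2 | h2 <;>
          simp [max_def] <;> omega

-- ===== VERDICT (by name: the statement is the Claim_ definition above) =====
theorem calculate_min_max_avg_diff_spec : Claim_equal_calculate_min_max_avg_diff := by
  intro data user_country user_range position_in_list _ hpre
  obtain ⟨hne, -, -⟩ := hpre
  obtain ⟨h0, t, rfl⟩ : ∃ h0 t, user_range = h0 :: t := by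
    cases user_range with
    | nil => exact absurd rfl hne
    | cons a b => exact ⟨a, b, rfl⟩
  unfold Spec_calculate_min_max_avg_diff calculate_min_max_avg_diff calculate_min_max_avg_diff_alt
  simp only []
  rw [foldA_char _ _ _ _ _ _ (le_refl _)]
  rw [show (fun d => PySem.List.pyGetD ((PySem.Dict.mk ((PySem.Dict.mk data).getD user_country [])).getD d []) position_in_list 0) = pvGetVal data user_country position_in_list from rfl]
  rw [show ((h0 :: t).map (pvGetVal data user_country position_in_list)) = (pvGetVal data user_country position_in_list h0) :: (t.map (pvGetVal data user_country position_in_list)) from rfl]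
  rw [pvMms_char ((h0 :: t).length) _ _ (by simp)]
  simp only [PySem.List.pyGetD_zero_cons, List.foldl_cons, List.length_cons, List.length_map,
    min_self, max_self, zero_add]
  simp [pvGetVal]
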